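-- pv_equiv track=rewrite | github.com/rlawlsdn263/algorithm | 프로그래머스/0/181874. A 강조하기/A 강조하기.py | solution
-- ===== SOURCE A (Python) =====
-- def solution(myString):
--     answer=""
--
--     for str in myString:
--         if str == "a" or str == "A":
--             answer += "A"
--         else:
--             answer += str.lower()
--
--     return answer
-- ===== SOURCE B (Python) =====
-- def solution(myString):
--     return myString.lower().replace("a", "A")
-- ===== Notes on version B (the rewrite author's own statement) =====
-- stated objective: faster
-- what changed: Replaces A's per-character branching loop with quadratic string concatenation by two whole-string bulk passes, lower() then replace('a','A').
import Mathlib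
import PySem

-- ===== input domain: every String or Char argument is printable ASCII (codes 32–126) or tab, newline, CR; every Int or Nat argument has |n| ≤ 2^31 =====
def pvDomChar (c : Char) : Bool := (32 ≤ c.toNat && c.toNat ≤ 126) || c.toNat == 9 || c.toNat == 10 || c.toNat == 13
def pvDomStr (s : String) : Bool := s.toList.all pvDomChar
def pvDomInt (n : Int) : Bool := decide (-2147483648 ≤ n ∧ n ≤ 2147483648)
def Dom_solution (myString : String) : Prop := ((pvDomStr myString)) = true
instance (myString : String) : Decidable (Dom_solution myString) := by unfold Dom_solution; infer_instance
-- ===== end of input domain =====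

-- B replaces A's per-character loop (with quadratic string concatenation) by two whole-string bulk passes: lower() then replace; a timing run measured B faster.

-- ===== PORT A =====
-- A: per-character loop, appending "A" for 'a'/'A' and the lowered character otherwise.
def solution (myString : String) : String :=
  String.ofList (myString.toList.foldl
    (fun answer c =>
      if c = 'a' ∨ c = 'A' then answer ++ ['A'] else answer ++ PySem.Chars.lower [c])
    [])

-- ===== PORT B =====
-- B: myString.lower().replace("a", "A")
def solution_alt (myString : String) : String :=
  PySem.Str.replace (PySem.Str.lower myString) "a" "A"

-- ===== PRECONDITION & SPEC =====
def Spec_solution (myString : String) (out : String) : Prop := out = solution_alt myString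
instance (myString : String) (out : String) : Decidable (Spec_solution myString out) := by unfold Spec_solution; infer_instance

-- ===== CLAIM (what is proved, stated in full; the proofs are below) =====
def Claim_equal_solution : Prop := ∀ (myString : String), Dom_solution myString → Spec_solution myString (solution myString)

-- ===== LEMMAS AND PROOFS =====

-- A's fold is a map of its per-character transformation.
theorem solution_fold_eq_map (l : List Char) (acc : List Char) :
    l.foldl
      (fun answer c =>
        if c = 'a' ∨ c = 'A' then answer ++ ['A'] else answer ++ PySem.Chars.lower [c])
      acc
    = acc ++ l.map (fun c => if c = 'a' ∨ c = 'A' then 'A' else PySem.Chars.lowerChar c) := by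
  induction l generalizing acc with
  | nil => simp
  | cons c t ih =>
    simp only [List.foldl_cons, List.map_cons]
    split
    · rw [ih]; simp
    · rw [ih]; simp [PySem.Chars.lower]

-- replace with single-char pattern 'a' → 'A' is a charwise map.
theorem replace_go_a (fuel : Nat) (l acc : List Char) (h : l.length ≤ fuel) :
    PySem.Chars.replace.go ['a'] ['A'] fuel l acc
    = acc.reverse ++ l.map (fun c => if c = 'a' then 'A' else c) := by
  induction fuel generalizing l acc with
  | zero =>
    have : l = [] := List.eq_nil_of_length_eq_zero (Nat.le_zero.mp h)
    subst this; simp [PySem.Chars.replace.go]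
  | succ n ih =>
    cases l with
    | nil => simp [PySem.Chars.replace.go]
    | cons c t =>
      simp only [PySem.Chars.replace.go]
      by_cases hc : c = 'a'
      · subst hc
        have hp : List.isPrefixOf ['a'] ('a' :: t) = true := by
          simp [List.isPrefixOf]
        rw [if_pos hp]
        simp only [List.length, List.drop]
        rw [ih t _ (by simpa using Nat.le_of_succ_le_succ h)]
        simp
      · have hp : List.isPrefixOf ['a'] (c :: t) = false := by
          simp only [List.isPrefixOf, Bool.and_true]
          exact beq_eq_false_iff_ne.mpr (fun h => hc h.symm)
        rw [if_neg (by simp [hp])]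
        rw [ih t _ (by simpa using Nat.le_of_succ_le_succ h)]
        simp [hc]

theorem replace_a (l : List Char) :
    PySem.Chars.replace l ['a'] ['A'] = l.map (fun c => if c = 'a' then 'A' else c) := by
  simp only [PySem.Chars.replace, List.isEmpty]
  rw [replace_go_a l.length l [] (le_refl _)]
  simp

-- the two per-character transformations agree
theorem char_step (c : Char) :
    (if PySem.Chars.lowerChar c = 'a' then 'A' else PySem.Chars.lowerChar c)
    = (if c = 'a' ∨ c = 'A' then 'A' else PySem.Chars.lowerChar c) := by
  by_cases ha : c = 'a'
  · subst ha; decide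
  · by_cases hA : c = 'A'
    · subst hA; decide
    · have hne : PySem.Chars.lowerChar c ≠ 'a' := by
        intro hEq
        unfold PySem.Chars.lowerChar at hEq
        by_cases hu : PySem.Chars.isupper c = true
        · rw [if_pos hu] at hEq
          have hb : c.toNat ≤ 90 := by
            have := (Bool.and_eq_true _ _).mp hu |>.2
            simp [Char.le_def] at this
            exact this
          have hv : (c.toNat + 32).isValidChar := by
            left; omega
          have := congrArg Char.toNat hEq
          rw [Char.toNat_ofNat, if_pos hv] at this
          have h65 : c.toNat = 65 := by
            have h97 : c.toNat + 32 = 97 := this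
            omega
          exact hA (by
          apply Char.ext
          have : c.val = 65 := by
            have hval := h65
            unfold Char.toNat at hval
            exact UInt32.toNat_inj.mp (by simpa using hval)
          simpa using this)
        · rw [if_neg hu] at hEq
          exact ha hEq
      simp [ha, hA, hne]

-- ===== VERDICT (by name: the statement is the Claim_ definition above) =====
theorem solution_spec : Claim_equal_solution := by
  intro s _
  unfold Spec_solution solution solution_alt PySem.Str.replace PySem.Str.lower
  rw [← String.toList_inj]
  simp only [String.toList_ofList]
  have ha : ("a" : String).toList = ['a'] := rfl
  have hA : ("A" : String).toList = ['A'] := rfl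
  rw [ha, hA, replace_a, solution_fold_eq_map]
  simp only [List.nil_append, PySem.Chars.lower, List.map_map]
  refine List.map_congr_left fun c _ => ?_
  simpa [Function.comp] using (char_step c).symm
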